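-- pv_equiv track=rewrite | github.com/rush86999/atom | backend/core/autonomous_documenter_agent.py | _insert_after_section
-- ===== SOURCE A (Python) =====
-- def _insert_after_section(
--
--     content: str,
--     section_name: str,
--     new_content: str
-- ) -> str:
--     """
--     Insert content after section in string.
--
--     Args:
--         content: File content
--         section_name: Section name
--         new_content: Content to insert
--
--     Returns:
--         Modified content
--     """
--     lines = content.split("\n")
--
--     for i, line in enumerate(lines):
--         if line.strip().startswith(section_name):
--             # Find next section or end of file
--             insert_at = i + 1
--             for j in range(i + 1, len(lines)):
--                 if lines[j].startswith("##"):
--                     insert_at = j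
--                     break
--             else:
--                 insert_at = len(lines)
--
--             # Insert content
--             lines.insert(insert_at, new_content)
--             break
--
--     return "\n".join(lines)
-- ===== SOURCE B (Python) =====
-- def _insert_after_section(content, section_name, new_content):
--     out = []
--     found = False
--     inserted = False
--     for line in content.split("\n"):
--         if found and not inserted and line.startswith("##"):
--             out.append(new_content)
--             inserted = True
--         if not found and line.strip().startswith(section_name):
--             found = True
--         out.append(line)
--     if found and not inserted:
--         out.append(new_content)
--     return "\n".join(out)
-- ===== Notes on version B (the rewrite author's own statement) =====
-- stated objective: alternative
-- what changed: Replaces A's nested index loops (enumerate + inner range scan for the next '##' header) and in-place list.insert with a single left-to-right pass carrying two booleans (found/inserted) that builds the output list directly.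
import Mathlib
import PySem

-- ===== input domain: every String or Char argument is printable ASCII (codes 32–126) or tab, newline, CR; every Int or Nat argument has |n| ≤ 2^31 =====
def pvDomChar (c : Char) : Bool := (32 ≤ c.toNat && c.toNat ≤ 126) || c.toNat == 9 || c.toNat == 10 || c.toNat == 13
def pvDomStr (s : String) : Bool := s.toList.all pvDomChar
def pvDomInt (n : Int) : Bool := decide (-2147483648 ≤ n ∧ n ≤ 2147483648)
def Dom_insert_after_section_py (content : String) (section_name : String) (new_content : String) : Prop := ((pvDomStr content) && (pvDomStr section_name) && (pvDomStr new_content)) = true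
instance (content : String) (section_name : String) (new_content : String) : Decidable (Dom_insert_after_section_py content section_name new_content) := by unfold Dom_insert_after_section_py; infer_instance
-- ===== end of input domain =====

-- B replaces A's nested index scans + in-place list.insert by one left-to-right pass with two booleans that builds the output list directly (objective: alternative decomposition; same asymptotic cost).

-- line.strip().startswith(section_name)  (the section test both Pythons write literally)
def pvPred (section_name : String) (line : String) : Bool :=
  PySem.Str.startswith (PySem.Str.strip line) section_name

-- line.startswith("##")  (the next-section test both Pythons write literally)
def pvHH (line : String) : Bool := PySem.Str.startswith line "##"

-- ===== PORT A =====
-- inner 'for j in range(i+1, len(lines)): if lines[j].startswith("##"): insert_at = j; break / else: insert_at = len(lines)'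
def pvInnerA (lines : List String) (js : List Int) : Int :=
  match js with
  | [] => (lines.length : Int)
  | j :: rest =>
    if pvHH (PySem.List.pyGetD lines j "") then j
    else pvInnerA lines rest

-- outer 'for i, line in enumerate(lines): …  break'
def pvOuterA (lines : List String) (section_name new_content : String)
    (rest : List (Int × String)) : List String :=
  match rest with
  | [] => lines
  | (i, line) :: rest' =>
    if pvPred section_name line then
      let insert_at := pvInnerA lines (PySem.List.pyRange (i + 1) (lines.length : Int) 1)
      PySem.List.insert lines insert_at new_content
    else pvOuterA lines section_name new_content rest'

def insert_after_section_py (content : String) (section_name : String) (new_content : String) : String :=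
  let lines := (PySem.Str.split? content "\n").getD []
  PySem.Str.join "\n" (pvOuterA lines section_name new_content (PySem.List.enumerate lines 0))

-- ===== PORT B =====
-- Source B's single pass: state (found, inserted, out)
def pvLoopB (section_name new_content : String) (lines : List String)
    (found inserted : Bool) (out : List String) : List String :=
  match lines with
  | [] => if found && !inserted then out ++ [new_content] else out
  | line :: rest =>
    let p := if found && !inserted && pvHH line then (true, out ++ [new_content])
             else (inserted, out)
    let found' := if !found && pvPred section_name line then true else found
    pvLoopB section_name new_content rest found' p.1 (p.2 ++ [line])

def insert_after_section_py_alt (content : String) (section_name : String) (new_content : String) : String :=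
  PySem.Str.join "\n" (pvLoopB section_name new_content ((PySem.Str.split? content "\n").getD []) false false [])

-- ===== PRECONDITION & SPEC =====
def Spec_insert_after_section_py (content : String) (section_name : String) (new_content : String) (out : String) : Prop := out = insert_after_section_py_alt content section_name new_content
instance (content : String) (section_name : String) (new_content : String) (out : String) : Decidable (Spec_insert_after_section_py content section_name new_content out) := by unfold Spec_insert_after_section_py; infer_instance

-- ===== CLAIM (what is proved, stated in full; the proofs are below) =====
def Claim_equal_insert_after_section_py : Prop := ∀ (content : String) (section_name : String) (new_content : String), Dom_insert_after_section_py content section_name new_content → Spec_insert_after_section_py content section_name new_content (insert_after_section_py content section_name new_content)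

-- ===== LEMMAS AND PROOFS =====

-- new_content placed before the first "##" line of the suffix, or at its end
def pvIns (new_content : String) : List String → List String
  | [] => [new_content]
  | x :: xs => if pvHH x then new_content :: x :: xs else x :: pvIns new_content xs

-- ---- B side ----
lemma loopB_done (sn nc : String) (lines out : List String) :
    pvLoopB sn nc lines true true out = out ++ lines := by
  induction lines generalizing out with
  | nil => simp [pvLoopB]
  | cons x xs ih => simp [pvLoopB, ih]

lemma loopB_found (sn nc : String) (lines out : List String) :
    pvLoopB sn nc lines true false out = out ++ pvIns nc lines := by
  induction lines generalizing out with
  | nil => simp [pvLoopB, pvIns]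
  | cons x xs ih =>
    by_cases h : pvHH x = true
    · simp [pvLoopB, pvIns, h, loopB_done]
    · simp [pvLoopB, pvIns, h, ih]

lemma loopB_notfound (sn nc : String) (pre lines out : List String)
    (hpre : ∀ l ∈ pre, pvPred sn l = false) :
    pvLoopB sn nc (pre ++ lines) false false out = pvLoopB sn nc lines false false (out ++ pre) := by
  induction pre generalizing out with
  | nil => simp
  | cons x xs ih =>
    have hx : pvPred sn x = false := hpre x (by simp)
    simp only [List.cons_append, pvLoopB, hx]
    simpa using ih (out ++ [x]) (fun l hl => hpre l (by simp [hl]))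

lemma loopB_none (sn nc : String) (lines : List String)
    (h : ∀ l ∈ lines, pvPred sn l = false) :
    pvLoopB sn nc lines false false [] = lines := by
  have := loopB_notfound sn nc lines [] [] h
  simpa [pvLoopB] using this

-- ---- A side ----
lemma outerA_skip (lines : List String) (sn nc : String) (e1 e2 : List (Int × String))
    (h : ∀ p ∈ e1, pvPred sn p.2 = false) :
    pvOuterA lines sn nc (e1 ++ e2) = pvOuterA lines sn nc e2 := by
  induction e1 with
  | nil => simp
  | cons p ps ih =>
    have hp : pvPred sn p.2 = false := h p (by simp)
    obtain ⟨i, l⟩ := p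
    simp only [List.cons_append, pvOuterA, hp]
    exact ih (fun q hq => h q (by simp [hq]))

lemma outerA_none (lines : List String) (sn nc : String) (e : List (Int × String))
    (h : ∀ p ∈ e, pvPred sn p.2 = false) :
    pvOuterA lines sn nc e = lines := by
  have := outerA_skip lines sn nc e [] h
  simpa [pvOuterA] using this

lemma innerA_spec (suf : List String) : ∀ (pre : List String) (a b : Int),
    a = (pre.length : Int) → b = ((pre ++ suf).length : Int) →
    pvInnerA (pre ++ suf) (PySem.List.pyRange a b 1) = a + (suf.findIdx pvHH : Int) := by
  induction suf with
  | nil =>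
    intro pre a b ha hb
    rw [PySem.List.pyRange_one_eq_nil (by simp at hb; omega)]
    simp [pvInnerA, ha]
  | cons x xs ih =>
    intro pre a b ha hb
    simp only [List.length_append, List.length_cons] at hb
    rw [PySem.List.pyRange_one_cons (by omega)]
    have hget : PySem.List.pyGetD (pre ++ x :: xs) a "" = x := by
      rw [ha]; simp [List.getD_eq_getElem?_getD]
    by_cases h : pvHH x = true
    · simp [pvInnerA, hget, h, List.findIdx_cons]
    · have hrec := ih (pre ++ [x]) (a + 1) b (by simp [List.length_append]; omega)
        (by simp [List.length_append]; omega)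
      simp only [List.append_assoc, List.singleton_append] at hrec
      simp only [pvInnerA, hget, h, Bool.false_eq_true, if_false]
      rw [hrec]
      simp [List.findIdx_cons, h]
      omega

lemma pvIns_eq (nc : String) (suf : List String) :
    pvIns nc suf = suf.take (suf.findIdx pvHH) ++ nc :: suf.drop (suf.findIdx pvHH) := by
  induction suf with
  | nil => simp [pvIns]
  | cons x xs ih =>
    by_cases h : pvHH x = true
    · simp [pvIns, h, List.findIdx_cons]
    · simp [pvIns, h, List.findIdx_cons, ih]

-- ---- the core equality on an arbitrary line list ----
lemma core_eq (sn nc : String) (lines : List String) :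
    pvOuterA lines sn nc (PySem.List.enumerate lines 0)
      = pvLoopB sn nc lines false false [] := by
  by_cases hex : ∃ l ∈ lines, pvPred sn l = true
  · have hdw : lines.dropWhile (fun l => !pvPred sn l) ≠ [] := by
      obtain ⟨l, hl, hpl⟩ := hex
      intro hnil
      rw [List.dropWhile_eq_nil_iff] at hnil
      have := hnil l hl
      simp [hpl] at this
    obtain ⟨l, suf, hls⟩ := List.exists_cons_of_ne_nil hdw
    set pre := lines.takeWhile (fun l => !pvPred sn l) with hpredef
    have hsplit : lines = pre ++ l :: suf := by
      rw [hpredef, ← hls]; exact (List.takeWhile_append_dropWhile).symm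
    have hprefalse : ∀ x ∈ pre, pvPred sn x = false := by
      intro x hx
      have := List.mem_takeWhile_imp hx
      simpa using this
    have hl : pvPred sn l = true := by
      have := List.head_dropWhile_not (fun l => !pvPred sn l) hdw
      simp only [hls, List.head_cons] at this
      simpa using this
    rw [hsplit]
    -- B side: skip pre, consume l, then the found-not-inserted pass
    rw [loopB_notfound sn nc pre (l :: suf) [] hprefalse]
    rw [show pvLoopB sn nc (l :: suf) false false ([] ++ pre)
          = pvLoopB sn nc suf true false (pre ++ [l]) from by simp [pvLoopB, hl]]
    rw [loopB_found]
    -- A side: skip enumerate pre, fire at (pre.length, l)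
    rw [PySem.List.enumerate_append, outerA_skip _ _ _ _ _ (by
      intro q hq
      have hq2 : q.2 ∈ pre := by
        have := List.mem_map_of_mem (f := Prod.snd) hq
        rwa [PySem.List.map_snd_enumerate] at this
      exact hprefalse _ hq2)]
    rw [PySem.List.enumerate_cons]
    simp only [pvOuterA, hl, if_true]
    rw [show pre ++ l :: suf = (pre ++ [l]) ++ suf from by simp]
    rw [innerA_spec suf (pre ++ [l]) (0 + (pre.length : Int) + 1) (((pre ++ [l]) ++ suf).length : Int)
        (by simp [List.length_append]) rfl]
    set k := suf.findIdx pvHH with hk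
    have hkle : k ≤ suf.length := List.findIdx_le_length
    rw [show (0 + (pre.length : Int) + 1) + (k : Int) = (((pre ++ [l]).length + k : Nat) : Int) from by
      simp [List.length_append]]
    rw [PySem.List.insert_natCast _ _ _ (by simp [List.length_append]; omega)]
    rw [pvIns_eq, ← hk]
    rw [List.take_length_add_append, List.drop_length_add_append]
    simp
  · have h : ∀ l ∈ lines, pvPred sn l = false := by
      intro l hl
      by_contra hc
      exact hex ⟨l, hl, by simpa using hc⟩
    rw [loopB_none sn nc lines h, outerA_none lines sn nc _ (by
      intro q hq
      have hq2 : q.2 ∈ lines := by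
        have := List.mem_map_of_mem (f := Prod.snd) hq
        rwa [PySem.List.map_snd_enumerate] at this
      exact h _ hq2)]

-- ===== VERDICT (by name: the statement is the Claim_ definition above) =====
theorem insert_after_section_py_spec : Claim_equal_insert_after_section_py := by
  intro content sn nc _
  unfold Spec_insert_after_section_py insert_after_section_py insert_after_section_py_alt
  exact congrArg (PySem.Str.join "\n") (core_eq sn nc _)
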